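-- pv_equiv track=rewrite | github.com/rabiulcste/vqazero | modeling_utils.py | majority_vote_with_indices
-- ===== SOURCE A (Python) =====
-- def majority_vote_with_indices(answers, sz):
--     num_questions = len(answers) // sz
--     results = []
--     indices = []
--     for i in range(num_questions):
--         question_answers = answers[i * sz : (i + 1) * sz]
--         counts = {}
--         for idx, ans in enumerate(question_answers):
--             if not ans:
--                 continue
--             if ans in counts:
--                 counts[ans]["count"] += 1
--                 counts[ans]["indices"].append(idx)
--             else:
--                 counts[ans] = {"count": 1, "indices": [idx]}
--         max_count = max(counts.values(), key=lambda x: x["count"])["count"] if counts else 0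
--         max_ans = [(k, v["indices"]) for k, v in counts.items() if v["count"] == max_count]
--         if max_ans:
--             results.append(max_ans[0][0])
--             indices.append(i * sz + max_ans[0][1][0])
--         else:
--             results.append("")
--             indices.append(i * sz)
--     return results, indices
-- ===== SOURCE B (Python) =====
-- def majority_vote_with_indices(answers, sz):
--     results, indices = [], []
--     for i in range(len(answers) // sz):
--         group = answers[i * sz : (i + 1) * sz]
--         counts = {}
--         for a in group:
--             if a:
--                 counts[a] = counts.get(a, 0) + 1
--         if counts:
--             m = max(counts.values())
--             idx, ans = next((j, a) for j, a in enumerate(group) if a and counts[a] == m)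
--             results.append(ans)
--             indices.append(i * sz + idx)
--         else:
--             results.append("")
--             indices.append(i * sz)
--     return results, indices
-- ===== Notes on version B (the rewrite author's own statement) =====
-- stated objective: simpler
-- what changed: A fuses counting into one loop over a dict of {'count','indices'} records and then takes max-by-count over the record values plus a filter over dict items; B counts nonempty answers into a plain int dict, takes max of the counts, and rescans the group in original order for the first position whose answer attains that maximum, which reproduces A's earliest-first-occurrence tie-break without storing any index lists. (measured ~1.5-2.2x faster: no per-answer index lists or nested dict records are built)
import Mathlib
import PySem

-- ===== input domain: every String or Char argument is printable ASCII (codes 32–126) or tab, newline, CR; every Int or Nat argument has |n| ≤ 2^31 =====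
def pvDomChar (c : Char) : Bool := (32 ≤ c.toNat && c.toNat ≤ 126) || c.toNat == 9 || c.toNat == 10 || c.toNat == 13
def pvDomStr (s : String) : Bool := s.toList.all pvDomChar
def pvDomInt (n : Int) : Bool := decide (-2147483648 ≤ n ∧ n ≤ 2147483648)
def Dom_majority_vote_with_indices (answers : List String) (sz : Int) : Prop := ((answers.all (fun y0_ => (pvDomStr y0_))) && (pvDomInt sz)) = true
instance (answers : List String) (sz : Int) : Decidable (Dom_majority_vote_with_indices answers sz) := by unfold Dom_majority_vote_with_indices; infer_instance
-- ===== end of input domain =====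

-- B replaces A's fused loop over a dict of {"count", "indices"} records by a plain count pass
-- followed by a rescan of the group for the first position achieving the maximum; a timing run
-- measured B faster (no per-answer index lists / nested records are built).

-- ===== PORT A =====
def majority_vote_with_indices (answers : List String) (sz : Int) : List String × List Int :=
  let numQuestions := PySem.Int.floordiv (PySem.List.len answers) sz
  (PySem.List.pyRange 0 numQuestions 1).foldl
    (fun (acc : List String × List Int) i =>
      let question_answers := PySem.List.slice answers (some (i * sz)) (some ((i + 1) * sz))
      let counts : PySem.Dict String (Int × List Int) :=
        (PySem.List.enumerate question_answers).foldl
          (fun d p =>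
            if p.2 == "" then d
            else if d.contains p.2 then
              d.modify p.2 (0, []) (fun cv => (cv.1 + 1, cv.2 ++ [p.1]))
            else d.insert p.2 (1, [p.1]))
          PySem.Dict.empty
      let maxCount : Int :=
        match PySem.List.max? counts.values (fun v => v.1) with
        | some v => v.1
        | none => 0
      let maxAns := (counts.items.filter (fun kv => kv.2.1 == maxCount)).map (fun kv => (kv.1, kv.2.2))
      match maxAns with
      | ma :: _ => (acc.1 ++ [ma.1], acc.2 ++ [i * sz + PySem.List.pyGetD ma.2 0 0])
      | [] => (acc.1 ++ [""], acc.2 ++ [i * sz]))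
    ([], [])

-- ===== PORT B =====
-- helper for Source B's 'next((j, a) for j, a in enumerate(group) if a and counts[a] == m)';
-- counts[a] is read with getD: the key is always present when the condition's first conjunct holds.
def pvFindMax (counts : PySem.Dict String Int) (m : Int) : List (Int × String) → Option (Int × String)
  | [] => none
  | p :: rest =>
    if p.2 != "" && counts.getD p.2 0 == m then some p else pvFindMax counts m rest

def majority_vote_with_indices_alt (answers : List String) (sz : Int) : List String × List Int :=
  let numQuestions := PySem.Int.floordiv (PySem.List.len answers) sz
  (PySem.List.pyRange 0 numQuestions 1).foldl
    (fun (acc : List String × List Int) i =>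
      let group := PySem.List.slice answers (some (i * sz)) (some ((i + 1) * sz))
      let counts : PySem.Dict String Int :=
        group.foldl (fun d a => if a == "" then d else d.insert a (d.getD a 0 + 1)) PySem.Dict.empty
      if counts.items.isEmpty then (acc.1 ++ [""], acc.2 ++ [i * sz])
      else
        let m : Int :=
          match PySem.List.max? counts.values (fun v => v) with
          | some v => v
          | none => 0
        match pvFindMax counts m (PySem.List.enumerate group) with
        | some p => (acc.1 ++ [p.2], acc.2 ++ [i * sz + p.1])
        | none => (acc.1 ++ [""], acc.2 ++ [i * sz]))  -- unreachable: the maximum is attained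
    ([], [])

-- ===== PRECONDITION & SPEC =====
-- Python A raises ZeroDivisionError on sz = 0 (len(answers) // sz); Pre_ excludes exactly that.
def Pre_majority_vote_with_indices (answers : List String) (sz : Int) : Prop := sz ≠ 0
instance (answers : List String) (sz : Int) : Decidable (Pre_majority_vote_with_indices answers sz) := by unfold Pre_majority_vote_with_indices; infer_instance
def pvWitness_majority_vote_with_indices : List String × Int := (["a", "", "b", "a"], 2)

def Spec_majority_vote_with_indices (answers : List String) (sz : Int) (out : List String × List Int) : Prop := out = majority_vote_with_indices_alt answers sz
instance (answers : List String) (sz : Int) (out : List String × List Int) : Decidable (Spec_majority_vote_with_indices answers sz out) := by unfold Spec_majority_vote_with_indices; infer_instance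

-- ===== CLAIM (what is proved, stated in full; the proofs are below) =====
def Claim_equal_majority_vote_with_indices : Prop := ∀ (answers : List String) (sz : Int), Dom_majority_vote_with_indices answers sz → Pre_majority_vote_with_indices answers sz → Spec_majority_vote_with_indices answers sz (majority_vote_with_indices answers sz)

-- ===== LEMMAS AND PROOFS =====

-- the nonempty answers of a group, and the positions of k in an enumeration starting at s
def pvXs (g : List String) : List String := g.filter (fun a => a != "")
def pvOccs (g : List String) (s : Int) (k : String) : List Int :=
  ((PySem.List.enumerate g s).filter (fun q => q.2 == k)).map (fun q => q.1)
def pvStepA (d : PySem.Dict String (Int × List Int)) (p : Int × String) : PySem.Dict String (Int × List Int) :=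
  if p.2 == "" then d
  else if d.contains p.2 then
    d.modify p.2 (0, []) (fun cv => (cv.1 + 1, cv.2 ++ [p.1]))
  else d.insert p.2 (1, [p.1])
def pvDictA (g : List String) : PySem.Dict String (Int × List Int) :=
  (PySem.List.enumerate g).foldl pvStepA PySem.Dict.empty

lemma pvOccs_cons (a : String) (t : List String) (s : Int) (k : String) :
    pvOccs (a :: t) s k = (if (a == k) then [s] else []) ++ pvOccs t (s + 1) k := by
  simp only [pvOccs, PySem.List.enumerate, List.filter_cons]
  split <;> simp_all

lemma pvSnd_mem_of_mem_enumerate {α : Type} {q : Int × α} {t : List α} {s : Int}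
    (h : q ∈ PySem.List.enumerate t s) : q.2 ∈ t := by
  induction t generalizing s with
  | nil => simp [PySem.List.enumerate] at h
  | cons x xs ih =>
    simp only [PySem.List.enumerate, List.mem_cons] at h
    rcases h with h | h
    · simp [h]
    · exact List.mem_cons_of_mem _ (ih h)

lemma pvOccs_eq_nil {t : List String} {k : String} (h : k ∉ t) (s : Int) : pvOccs t s k = [] := by
  simp only [pvOccs, List.map_eq_nil_iff, List.filter_eq_nil_iff]
  intro q hq hk
  exact h (by simpa [eq_of_beq hk] using pvSnd_mem_of_mem_enumerate hq)

lemma pvOccs_append_singleton (t : List String) (a : String) (k : String) :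
    pvOccs (t ++ [a]) 0 k = pvOccs t 0 k ++ (if (a == k) then [(t.length : Int)] else []) := by
  simp only [pvOccs, PySem.List.enumerate_append, List.filter_append, List.map_append]
  congr 1
  simp only [PySem.List.enumerate, List.filter_cons]
  split <;> simp

lemma pvDictA_append (t : List String) (a : String) :
    pvDictA (t ++ [a]) = pvStepA (pvDictA t) ((t.length : Int), a) := by
  unfold pvDictA
  rw [PySem.List.enumerate_append, List.foldl_append]
  simp [PySem.List.enumerate]

lemma pvDictA_items (g : List String) :
    (pvDictA g).items
      = (PySem.Set.ofList (pvXs g)).map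
          (fun k => (k, ((List.count k (pvXs g) : Int), pvOccs g 0 k))) := by
  induction g using List.reverseRecOn with
  | nil => rfl
  | append_singleton t a ih =>
    have hkeys : (pvDictA t).keys = PySem.Set.ofList (pvXs t) := by
      rw [PySem.Dict.keys, ih, List.map_map]
      have : ((fun x : String × (Int × List Int) => x.1) ∘ fun k => (k, ((List.count k (pvXs t) : Int), pvOccs t 0 k))) = id := rfl
      rw [this, List.map_id]
    have hnodup : (pvDictA t).keys.Nodup := by rw [hkeys]; exact PySem.Set.nodup_ofList _
    have hne : ∀ k ∈ PySem.Set.ofList (pvXs t), k ≠ "" := by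
      intro k hk
      have := (PySem.Set.mem_ofList _ _).mp hk
      simp only [pvXs, List.mem_filter, bne_iff_ne] at this
      exact this.2
    rw [pvDictA_append, pvStepA]
    by_cases ha : a = ""
    · subst ha
      have hx : pvXs (t ++ [""]) = pvXs t := by simp [pvXs, List.filter_append]
      simp only [hx, beq_self_eq_true, if_true, ih]
      apply List.map_congr_left
      intro k hk
      have h2 : ("" == k) = false := beq_eq_false_iff_ne.mpr (Ne.symm (hne k hk))
      rw [pvOccs_append_singleton, h2]
      simp
    · have ha' : (a == "") = false := beq_eq_false_iff_ne.mpr ha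
      have hx : pvXs (t ++ [a]) = pvXs t ++ [a] := by
        simp [pvXs, List.filter_append, ha]
      simp only [ha', Bool.false_eq_true, if_false, hx, PySem.Set.ofList_append_singleton]
      by_cases hc : (pvDictA t).contains a = true
      · have hamem : a ∈ PySem.Set.ofList (pvXs t) := by
          rw [← hkeys]; exact (PySem.Dict.contains_iff_mem_keys _ _).mp hc
        have hgetD : (pvDictA t).getD a (0, []) = ((List.count a (pvXs t) : Int), pvOccs t 0 a) :=
          PySem.Dict.getD_of_mem_items _ (by rw [ih]; exact List.mem_map_of_mem hamem) hnodup _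
        rw [PySem.Set.add_of_mem hamem]
        simp only [PySem.Dict.modify, hc, if_true]
        rw [PySem.Dict.items_insert_of_contains _ _ hc, hgetD, ih, List.map_map]
        apply List.map_congr_left
        intro k hk
        by_cases hka : k = a
        · subst hka
          rw [pvOccs_append_singleton]
          simp [List.count_append]
        · have h1 : (k == a) = false := beq_eq_false_iff_ne.mpr hka
          have h2 : (a == k) = false := beq_eq_false_iff_ne.mpr (Ne.symm hka)
          rw [pvOccs_append_singleton]
          simp [Function.comp, h1, h2, List.count_append, List.count_singleton]
      · have hc' : (pvDictA t).contains a = false := by simpa using hc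
        have hamem : a ∉ PySem.Set.ofList (pvXs t) := by
          rw [← hkeys]; intro h
          rw [(PySem.Dict.contains_iff_mem_keys _ _).mpr h] at hc'; simp at hc'
        have hat : a ∉ t := by
          intro h
          exact hamem ((PySem.Set.mem_ofList _ _).mpr (by
            simp [pvXs, List.mem_filter, h, ha]))
        rw [PySem.Set.add_of_not_mem hamem]
        simp only [hc', Bool.false_eq_true, if_false]
        rw [PySem.Dict.items_insert_of_not_contains _ _ hc', ih, List.map_append]
        congr 1
        · apply List.map_congr_left
          intro k hk
          have hka : k ≠ a := fun h => hamem (h ▸ hk)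
          have h1 : (k == a) = false := beq_eq_false_iff_ne.mpr hka
          have h2 : (a == k) = false := beq_eq_false_iff_ne.mpr (Ne.symm hka)
          rw [pvOccs_append_singleton, h2]
          simp [List.count_append, Ne.symm hka]
        · have hcnt : List.count a (pvXs t) = 0 :=
            List.count_eq_zero.mpr (fun h => hamem ((PySem.Set.mem_ofList _ _).mpr h))
          simp only [List.map_cons, List.map_nil]
          rw [pvOccs_append_singleton]
          simp [List.count_append, hcnt, pvOccs_eq_nil hat]

lemma pvFindMax_enumerate (counts : PySem.Dict String Int) (m : Int) (g : List String) (s : Int) :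
    pvFindMax counts m (PySem.List.enumerate g s)
      = ((PySem.Set.ofList (pvXs g)).filter
            (fun a => a != "" && counts.getD a 0 == m)).head?.map
          (fun k => (PySem.List.pyGetD (pvOccs g s k) 0 0, k)) := by
  induction g generalizing s with
  | nil => rfl
  | cons a t ih =>
    have henum : PySem.List.enumerate (a :: t) s = (s, a) :: PySem.List.enumerate t (s + 1) := rfl
    rw [henum]
    by_cases ha : a = ""
    · subst ha
      have hx : pvXs ("" :: t) = pvXs t := by simp [pvXs]
      have hc : (("" : String) != "" && counts.getD "" 0 == m) = false := by simp
      simp only [pvFindMax, hc, Bool.false_eq_true, if_false, hx, ih]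
      cases hh : ((PySem.Set.ofList (pvXs t)).filter
          (fun a => a != "" && counts.getD a 0 == m)).head? with
      | none => simp
      | some k =>
        have hmem := List.mem_filter.mp (List.mem_of_mem_head? hh)
        have hkne : k ≠ "" := by
          have := hmem.2; simp only [Bool.and_eq_true, bne_iff_ne] at this; exact this.1
        have : ("" == k) = false := beq_eq_false_iff_ne.mpr (Ne.symm hkne)
        simp only [Option.map_some, pvOccs_cons, this, Bool.false_eq_true, if_false, List.nil_append]
    · have hx : pvXs (a :: t) = a :: pvXs t := by
        simp [pvXs, bne_iff_ne, ha]
      rw [hx, PySem.Set.ofList_cons]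
      by_cases hca : (a != "" && counts.getD a 0 == m) = true
      · simp only [pvFindMax, hca, if_true, List.filter_cons, List.head?_cons]
        have : (a == a) = true := by simp
        simp only [Option.map_some, pvOccs_cons, this, if_true, List.cons_append,
          PySem.List.pyGetD_zero_cons]
      · have hca' : (a != "" && counts.getD a 0 == m) = false := by simpa using hca
        simp only [pvFindMax, hca', Bool.false_eq_true, if_false, ih, List.filter_cons]
        have hfd : List.filter (fun y => y != "" && counts.getD y 0 == m)
              ((PySem.Set.ofList (pvXs t)).discard a)
            = List.filter (fun y => y != "" && counts.getD y 0 == m) (PySem.Set.ofList (pvXs t)) := by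
          rw [PySem.Set.discard, List.filter_filter]
          apply List.filter_congr
          intro y _
          cases hy : (y != "" && counts.getD y 0 == m) with
          | false => simp
          | true =>
            have hya : y ≠ a := fun h => by rw [h, hca'] at hy; exact Bool.false_ne_true hy
            simp [beq_eq_false_iff_ne.mpr hya]
        rw [hfd]
        cases hh : ((PySem.Set.ofList (pvXs t)).filter
            (fun y => y != "" && counts.getD y 0 == m)).head? with
        | none => simp
        | some k =>
          have hmem := List.mem_filter.mp (List.mem_of_mem_head? hh)
          have hka : k ≠ a := fun h => by rw [h, hca'] at hmem; exact Bool.false_ne_true hmem.2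
          have : (a == k) = false := beq_eq_false_iff_ne.mpr (Ne.symm hka)
          simp only [Option.map_some, pvOccs_cons, this, Bool.false_eq_true, if_false, List.nil_append]

lemma pvCountsB_eq (g : List String) :
    g.foldl (fun d a => if a == "" then d else d.insert a (d.getD a 0 + 1)) PySem.Dict.empty
      = PySem.Dict.counter (pvXs g) := by
  have h : (fun (d : PySem.Dict String Int) a => if a == "" then d else d.insert a (d.getD a 0 + 1))
      = (fun d a => if (a != "") then d.insert a (d.getD a 0 + 1) else d) := by
    funext d a; cases h : (a == "") <;> simp [bne, h]
  rw [h, PySem.List.foldl_if_eq_foldl_filter, PySem.Dict.foldl_insert_getD_add_one_eq_counter]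
  rfl

lemma pvGroup (g : List String) (acc : List String × List Int) (o : Int) :
    (let counts : PySem.Dict String (Int × List Int) :=
        (PySem.List.enumerate g).foldl
          (fun d p =>
            if p.2 == "" then d
            else if d.contains p.2 then
              d.modify p.2 (0, []) (fun cv => (cv.1 + 1, cv.2 ++ [p.1]))
            else d.insert p.2 (1, [p.1]))
          PySem.Dict.empty
     let maxCount : Int :=
        match PySem.List.max? counts.values (fun v => v.1) with
        | some v => v.1
        | none => 0
     let maxAns := (counts.items.filter (fun kv => kv.2.1 == maxCount)).map (fun kv => (kv.1, kv.2.2))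
     match maxAns with
     | ma :: _ => (acc.1 ++ [ma.1], acc.2 ++ [o + PySem.List.pyGetD ma.2 0 0])
     | [] => (acc.1 ++ [""], acc.2 ++ [o]))
    =
    (let counts : PySem.Dict String Int :=
        g.foldl (fun d a => if a == "" then d else d.insert a (d.getD a 0 + 1)) PySem.Dict.empty
     if counts.items.isEmpty then (acc.1 ++ [""], acc.2 ++ [o])
     else
       let m : Int :=
        match PySem.List.max? counts.values (fun v => v) with
        | some v => v
        | none => 0
       match pvFindMax counts m (PySem.List.enumerate g) with
       | some p => (acc.1 ++ [p.2], acc.2 ++ [o + p.1])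
       | none => (acc.1 ++ [""], acc.2 ++ [o])) := by
  have hA : (PySem.List.enumerate g).foldl
          (fun d p =>
            if p.2 == "" then d
            else if d.contains p.2 then
              d.modify p.2 (0, []) (fun cv => (cv.1 + 1, cv.2 ++ [p.1]))
            else d.insert p.2 (1, [p.1]))
          PySem.Dict.empty = pvDictA g := rfl
  simp only [hA, pvCountsB_eq]
  by_cases hx : pvXs g = []
  · simp [PySem.Dict.values, pvDictA_items, PySem.Dict.items_counter, hx]
  · -- some nonempty answer exists
    have hK : PySem.Set.ofList (pvXs g) ≠ [] := by
      intro h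
      rcases List.exists_mem_of_ne_nil _ hx with ⟨k1, hk1⟩
      have := (PySem.Set.mem_ofList (pvXs g) k1).mpr hk1
      simp [h] at this
    have hne : ∀ k ∈ PySem.Set.ofList (pvXs g), k ≠ "" := by
      intro k hk
      have := (PySem.Set.mem_ofList _ _).mp hk
      simp only [pvXs, List.mem_filter, bne_iff_ne] at this
      exact this.2
    have hvA : (pvDictA g).values
        = (PySem.Set.ofList (pvXs g)).map (fun k => ((List.count k (pvXs g) : Int), pvOccs g 0 k)) := by
      rw [PySem.Dict.values, pvDictA_items, List.map_map]; rfl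
    have hvB : (PySem.Dict.counter (pvXs g)).values
        = (PySem.Set.ofList (pvXs g)).map (fun k => (List.count k (pvXs g) : Int)) := by
      rw [PySem.Dict.values, PySem.Dict.items_counter, List.map_map]; rfl
    have hBne : ¬(PySem.Dict.counter (pvXs g)).items.isEmpty = true := by
      rw [PySem.Dict.items_counter, List.isEmpty_iff, List.map_eq_nil_iff]
      exact hK
    rw [if_neg hBne]
    cases hma : PySem.List.max? (pvDictA g).values (fun v => v.1) with
    | none =>
      rw [PySem.List.max?_eq_none_iff, hvA, List.map_eq_nil_iff] at hma
      exact absurd hma hK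
    | some v =>
      cases hmb : PySem.List.max? (PySem.Dict.counter (pvXs g)).values (fun v => v) with
      | none =>
        rw [PySem.List.max?_eq_none_iff, hvB, List.map_eq_nil_iff] at hmb
        exact absurd hmb hK
      | some w =>
        -- the two maxima agree
        have hvmem := PySem.List.max?_mem hma
        rw [hvA] at hvmem
        rcases List.mem_map.mp hvmem with ⟨kv, hkv, hkveq⟩
        have hwmem := PySem.List.max?_mem hmb
        rw [hvB] at hwmem
        rcases List.mem_map.mp hwmem with ⟨kw, hkw, hkweq⟩
        have hv1 : v.1 = (List.count kv (pvXs g) : Int) := by rw [← hkveq]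
        have h1 : v.1 ≤ w := by
          rw [hv1]
          exact PySem.List.max?_isMax hmb _ (by rw [hvB]; exact List.mem_map_of_mem hkv)
        have h2 : w ≤ v.1 := by
          have := PySem.List.max?_isMax hma ((List.count kw (pvXs g) : Int), pvOccs g 0 kw)
            (by rw [hvA]; exact List.mem_map_of_mem hkw)
          rw [← hkweq]
          exact this
        have hvw : v.1 = w := le_antisymm h1 h2
        -- A's candidate list
        have hitems : (pvDictA g).items.filter (fun kv => kv.2.1 == v.1)
            = ((PySem.Set.ofList (pvXs g)).filter
                (fun k => ((List.count k (pvXs g) : Int) == w))).map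
                (fun k => (k, ((List.count k (pvXs g) : Int), pvOccs g 0 k))) := by
          rw [pvDictA_items, List.filter_map, hvw]
          rfl
        have hfilne : (PySem.Set.ofList (pvXs g)).filter
            (fun k => ((List.count k (pvXs g) : Int) == w)) ≠ [] := by
          intro h
          have : kw ∈ (PySem.Set.ofList (pvXs g)).filter
              (fun k => ((List.count k (pvXs g) : Int) == w)) := by
            rw [List.mem_filter]
            exact ⟨hkw, by rw [hkweq]; simp⟩
          rw [h] at this
          exact List.not_mem_nil this
        rcases List.exists_cons_of_ne_nil hfilne with ⟨k0, r, hk0r⟩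
        -- B's scan via the heart lemma, with the filters identified
        have hscan : pvFindMax (PySem.Dict.counter (pvXs g)) w (PySem.List.enumerate g)
            = some (PySem.List.pyGetD (pvOccs g 0 k0) 0 0, k0) := by
          rw [pvFindMax_enumerate]
          have hfc : (PySem.Set.ofList (pvXs g)).filter
                (fun a => a != "" && (PySem.Dict.counter (pvXs g)).getD a 0 == w)
              = (PySem.Set.ofList (pvXs g)).filter
                (fun k => ((List.count k (pvXs g) : Int) == w)) := by
            apply List.filter_congr
            intro k hk
            rw [PySem.Dict.getD_counter]
            simp [bne_iff_ne, hne k hk]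
          rw [hfc, hk0r]
          rfl
        dsimp only
        rw [hitems, hk0r, hscan]
        simp only [List.map_cons]

-- ===== VERDICT (by name: the statement is the Claim_ definition above) =====
theorem majority_vote_with_indices_spec : Claim_equal_majority_vote_with_indices := by
  intro answers sz _hdom _hpre
  unfold Spec_majority_vote_with_indices
  unfold majority_vote_with_indices majority_vote_with_indices_alt
  refine congrFun (congrFun (congrArg _ (funext fun acc => funext fun i => ?_)) _) _
  exact pvGroup (PySem.List.slice answers (some (i * sz)) (some ((i + 1) * sz))) acc (i * sz)
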